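-- pv_equiv track=rewrite | github.com/kkihui/BOJ | 백준/Gold/1107. 리모컨/리모컨.py | target2minus
-- ===== SOURCE A (Python) =====
-- def target2minus(init,button):
--     cnt = 0
--     while True:
--         numli = set(str(init))
--         if numli <= button:
--             return cnt + len(str(init))
--         init -= 1
--         cnt += 1
--         if init == -1:
--             return 500001
-- ===== SOURCE B (Python) =====
-- def best_le(s, allowed):
--     # largest same-length digit string over 'allowed' that is lexicographically <= s, else None
--     if not s:
--         return []
--     c, rest = s[0], s[1:]
--     if c in allowed:
--         t = best_le(rest, allowed)
--         if t is not None: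
--             return [c] + t
--     lower = [d for d in allowed if d < c]
--     if lower:
--         return [lower[-1]] + [allowed[-1]] * len(rest)
--     return None
--
--
-- def target2minus(init, button):
--     allowed = [d for d in range(10) if str(d) in button]  # ascending
--     s = []
--     n = init
--     while n > 0:
--         s.append(n % 10)
--         n //= 10
--     s.reverse()
--     if not s:
--         s = [0]
--     t = best_le(s, allowed)
--     if t is not None:
--         m = 0
--         for d in t:
--             m = 10 * m + d
--     elif len(s) >= 2 and allowed:
--         m = 0
--         for _ in range(len(s) - 1):
--             m = 10 * m + allowed[-1]
--     else:
--         return 500001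
--     return (init - m) + len(str(m))
-- ===== Notes on version B (the rewrite author's own statement) =====
-- stated objective: faster
-- what changed: Instead of decrementing init and re-testing the digit set each step, B computes the allowed digits once and finds the largest number <= init whose digits are all allowed by a greedy lexicographic search over init's decimal digits (with a shorter-number fallback), then returns (init - m) + len(str(m)) directly.
-- outside the precondition, e.g. on target2minus(-1, {'1', '-'}): A returns 2, B returns 500001
import Mathlib
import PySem

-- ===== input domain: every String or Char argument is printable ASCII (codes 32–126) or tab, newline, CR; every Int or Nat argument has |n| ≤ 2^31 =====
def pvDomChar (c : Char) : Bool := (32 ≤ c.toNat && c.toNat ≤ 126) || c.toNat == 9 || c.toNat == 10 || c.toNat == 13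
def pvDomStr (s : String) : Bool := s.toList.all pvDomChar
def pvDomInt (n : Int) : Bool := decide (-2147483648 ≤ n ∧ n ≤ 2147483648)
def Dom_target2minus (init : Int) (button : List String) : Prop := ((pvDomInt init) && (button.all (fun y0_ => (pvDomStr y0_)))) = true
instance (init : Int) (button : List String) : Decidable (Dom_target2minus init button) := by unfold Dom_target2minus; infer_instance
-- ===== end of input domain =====

-- B replaces A's decrement-and-retest loop by a greedy lexicographic search over the decimal
-- digits for the largest number ≤ init whose digits are all on allowed buttons (objective: faster).


-- ===== PORT A =====
-- numli = set(str(init)); numli <= button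
def target2minusValid (init : Int) (button : List String) : Bool :=
  PySem.Set.issubset
    (PySem.Set.ofList ((PySem.Int.toStr init).toList.map (fun c => String.ofList [c]))) button

-- the while-loop; fuel only bounds the recursion (unreachable at 0 when started with fuel = init.toNat)
def target2minusLoop (button : List String) : Nat → Int → Int → Int
  | fuel, init, cnt =>
    if target2minusValid init button then cnt + PySem.Str.len (PySem.Int.toStr init)
    else if init - 1 = -1 then 500001
    else match fuel with
      | 0 => 500001
      | f + 1 => target2minusLoop button f (init - 1) (cnt + 1)

def target2minus (init : Int) (button : List String) : Int :=
  target2minusLoop button init.toNat init 0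

-- ===== PORT B =====
-- allowed = [d for d in range(10) if str(d) in button]
def pvAllowed (button : List String) : List Int :=
  (PySem.List.pyRange 0 10 1).filter (fun d => button.contains (PySem.Int.toStr d))

-- digits of init, least significant first (the `while n > 0` loop of Source B)
def target2minusRevDigits (n : Int) : List Int :=
  if _h : 0 < n then PySem.Int.mod n 10 :: target2minusRevDigits (PySem.Int.floordiv n 10) else []
  termination_by n.toNat
  decreasing_by
    have he : PySem.Int.floordiv n 10 = n / 10 := PySem.Int.floordiv_eq_ediv_of_pos (by norm_num)
    rw [he]; omega

-- the shared fall-through tail of best_le: the `lower` block and the final `return None`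
def target2minusBestLeFallback (c : Int) (rest allowed : List Int) : Option (List Int) :=
  let lower := allowed.filter (fun d => decide (d < c))
  if lower.isEmpty then none
  else some (PySem.List.pyGetD lower (-1) 0 ::
             List.replicate rest.length (PySem.List.pyGetD allowed (-1) 0))

-- best_le(s, allowed) of Source B
def target2minusBestLe : List Int → List Int → Option (List Int)
  | [], _ => some []
  | c :: rest, allowed =>
    if allowed.contains c then
      match target2minusBestLe rest allowed with
      | some t => some (c :: t)
      | none => target2minusBestLeFallback c rest allowed
    else target2minusBestLeFallback c rest allowed

def target2minus_alt (init : Int) (button : List String) : Int :=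
  let allowed := pvAllowed button
  let s0 := (target2minusRevDigits init).reverse
  let s := if s0.isEmpty then [(0 : Int)] else s0
  match target2minusBestLe s allowed with
  | some t =>
      let m := t.foldl (fun m d => 10 * m + d) 0
      (init - m) + PySem.Str.len (PySem.Int.toStr m)
  | none =>
      if 2 ≤ s.length ∧ ¬ allowed.isEmpty then
        let m := (PySem.List.pyRange 0 ((s.length : Int) - 1) 1).foldl
                   (fun m _ => 10 * m + PySem.List.pyGetD allowed (-1) 0) 0
        (init - m) + PySem.Str.len (PySem.Int.toStr m)
      else 500001

-- ===== PRECONDITION & SPEC =====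
-- Pre_ excludes negative init: there A never returns except at init = -1 itself (when '-' and '1'
-- are both buttons, an accidental success of the subset test on the string "-1") and otherwise
-- loops forever below -1.
def Pre_target2minus (init : Int) (button : List String) : Prop := 0 ≤ init
instance (init : Int) (button : List String) : Decidable (Pre_target2minus init button) := by
  unfold Pre_target2minus; infer_instance
def pvWitness_target2minus : Int × List String := (42, ["4", "2"])
def Spec_target2minus (init : Int) (button : List String) (out : Int) : Prop := out = target2minus_alt init button
instance (init : Int) (button : List String) (out : Int) : Decidable (Spec_target2minus init button out) := by unfold Spec_target2minus; infer_instance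

-- ===== CLAIM (what is proved, stated in full; the proofs are below) =====
def Claim_equal_target2minus : Prop := ∀ (init : Int) (button : List String), Dom_target2minus init button → Pre_target2minus init button → Spec_target2minus init button (target2minus init button)

-- ===== LEMMAS AND PROOFS =====

-- the value of a most-significant-first digit list
def pvVal (l : List Int) : Int := l.foldl (fun m d => 10 * m + d) 0

-- the top-down search A performs, as a specification: the first valid number ≤ n
def pvSpecLoop (button : List String) : Nat → Option Nat
  | 0 => if target2minusValid ((0 : Nat) : Int) button then some 0 else none
  | n + 1 => if target2minusValid ((n + 1 : Nat) : Int) button then some (n + 1) else pvSpecLoop button n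

def pvOK (l : List Int) : Prop := ∀ d ∈ l, 0 ≤ d ∧ d < 10
def pvGood (al l : List Int) : Prop := ∀ d ∈ l, d ∈ al

theorem pvVal_foldl (l : List Int) (a : Int) :
    l.foldl (fun m d => 10 * m + d) a = a * 10 ^ l.length + pvVal l := by
  induction l generalizing a with
  | nil => simp [pvVal]
  | cons d l ih =>
    have h2 : pvVal (d :: l) = (10 * 0 + d) * 10 ^ l.length + pvVal l := by
      simp only [pvVal, List.foldl_cons]; exact ih (10 * 0 + d)
    simp only [List.foldl_cons, List.length_cons]
    rw [ih (10 * a + d), h2]; ring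

theorem pvVal_cons (c : Int) (l : List Int) : pvVal (c :: l) = c * 10 ^ l.length + pvVal l := by
  have := pvVal_foldl l (10 * 0 + c)
  simp only [pvVal, List.foldl_cons] at *
  rw [this]; ring

theorem pvVal_append_singleton (l : List Int) (d : Int) : pvVal (l ++ [d]) = 10 * pvVal l + d := by
  simp only [pvVal, List.foldl_append, List.foldl_cons, List.foldl_nil]

theorem pvVal_bounds : ∀ l : List Int, pvOK l → 0 ≤ pvVal l ∧ pvVal l < 10 ^ l.length := by
  intro l
  induction l with
  | nil => intro _; simp [pvVal]
  | cons c l ih =>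
    intro h
    obtain ⟨h1, h2⟩ := ih (fun d hd => h d (List.mem_cons_of_mem _ hd))
    have hc : 0 ≤ c ∧ c < 10 := h c (by simp)
    rw [pvVal_cons]
    have hP : (0:Int) < 10 ^ l.length := by positivity
    constructor
    · have := mul_nonneg hc.1 hP.le
      linarith
    · have h9 : c ≤ 9 := by omega
      have := mul_le_mul_of_nonneg_right h9 hP.le
      rw [List.length_cons, pow_succ]
      linarith

theorem pvVal_replicate_succ (j : Nat) (d : Int) :
    pvVal (List.replicate (j + 1) d) = 10 * pvVal (List.replicate j d) + d := by
  rw [List.replicate_succ', pvVal_append_singleton]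

theorem pvVal_replicate_nonneg (d : Int) (hd : 0 ≤ d) (j : Nat) :
    0 ≤ pvVal (List.replicate j d) := by
  induction j with
  | zero => simp [pvVal]
  | succ j ih => rw [pvVal_replicate_succ]; linarith

theorem pvVal_replicate_mono (d : Int) (hd : 0 ≤ d) {j k : Nat} (h : j ≤ k) :
    pvVal (List.replicate j d) ≤ pvVal (List.replicate k d) := by
  induction k, h using Nat.le_induction with
  | base => exact le_rfl
  | succ k hk ih =>
    rw [pvVal_replicate_succ]
    have := pvVal_replicate_nonneg d hd k
    linarith

theorem pvVal_le_replicate : ∀ (l : List Int) (d : Int), pvOK l → (∀ x ∈ l, x ≤ d) → 0 ≤ d →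
    pvVal l ≤ pvVal (List.replicate l.length d) := by
  intro l
  induction l with
  | nil => intro d _ _ _; simp
  | cons c l ih =>
    intro d hok hle hd
    rw [pvVal_cons, List.length_cons, List.replicate_succ, pvVal_cons, List.length_replicate]
    have h1 := ih d (fun x hx => hok x (List.mem_cons_of_mem _ hx))
      (fun x hx => hle x (List.mem_cons_of_mem _ hx)) hd
    have hc : c ≤ d := hle c (by simp)
    have hP : (0:Int) ≤ 10 ^ l.length := by positivity
    have := mul_le_mul_of_nonneg_right hc hP
    linarith

theorem pvVal_zeros_prefix (j : Nat) (l : List Int) :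
    pvVal (List.replicate j 0 ++ l) = pvVal l := by
  induction j with
  | zero => simp
  | succ j ih =>
    rw [List.replicate_succ, List.cons_append, pvVal_cons, ih]
    ring

theorem pv_getLast_max : ∀ (l : List Int), l.Pairwise (· < ·) → ∀ (h : l ≠ []),
    ∀ d ∈ l, d ≤ l.getLast h := by
  intro l
  induction l with
  | nil => intro _ h; exact absurd rfl h
  | cons a l ih =>
    intro hp h d hd
    cases l with
    | nil =>
      simp at hd
      subst hd; simp
    | cons b l' =>
      rw [List.getLast_cons (List.cons_ne_nil b l')]
      rcases List.mem_cons.mp hd with rfl | hd'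
      · exact le_of_lt ((List.pairwise_cons.mp hp).1 _ (List.getLast_mem _))
      · exact ih (List.pairwise_cons.mp hp).2 (List.cons_ne_nil b l') d hd'

theorem pvAllowed_pairwise (button : List String) : (pvAllowed button).Pairwise (· < ·) := by
  unfold pvAllowed
  have h : PySem.List.pyRange 0 10 1 = [0,1,2,3,4,5,6,7,8,9] := by decide
  rw [h]
  exact List.Pairwise.filter _ (by decide)

theorem pvAllowed_OK (button : List String) : pvOK (pvAllowed button) := by
  intro d hd
  unfold pvAllowed at hd
  rw [List.mem_filter] at hd
  have := PySem.List.mem_pyRange_one.mp hd.1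
  omega

theorem mem_pvAllowed (button : List String) (d : Int) :
    d ∈ pvAllowed button ↔ 0 ≤ d ∧ d < 10 ∧ button.contains (PySem.Int.toStr d) = true := by
  unfold pvAllowed
  rw [List.mem_filter, PySem.List.mem_pyRange_one]
  constructor
  · rintro ⟨⟨h1, h2⟩, h3⟩; exact ⟨h1, h2, h3⟩
  · rintro ⟨h1, h2, h3⟩; exact ⟨⟨h1, h2⟩, h3⟩

-- bridge: Nat.toDigitsCore produces the reversed decimal digits
theorem pv_toDigitsCore_eq (f : Nat) : ∀ (n : Nat) (l : List Char), 0 < n → n < 10 ^ f →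
    Nat.toDigitsCore 10 f n l = ((Nat.digits 10 n).map Nat.digitChar).reverse ++ l := by
  induction f with
  | zero => intro n l hn hf; simp at hf; omega
  | succ f ih =>
    intro n l hn hf
    rw [Nat.toDigitsCore]
    by_cases h0 : n / 10 = 0
    · simp only [h0, if_pos]
      rw [Nat.digits_def' (by norm_num : (1:Nat) < 10) hn, h0, Nat.digits_zero]
      simp
    · have hpos : 0 < n / 10 := Nat.pos_of_ne_zero h0
      have hlt : n / 10 < 10 ^ f := by
        exact Nat.div_lt_of_lt_mul (by rw [← pow_succ']; exact hf)
      simp only [h0, if_false]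
      rw [ih (n / 10) (Nat.digitChar (n % 10) :: l) hpos hlt]
      rw [Nat.digits_def' (by norm_num : (1:Nat) < 10) hn]
      simp

theorem pv_toChars_natCast (m : Nat) :
    PySem.Int.toChars (m : Int) =
      if m = 0 then ['0'] else ((Nat.digits 10 m).map Nat.digitChar).reverse := by
  by_cases h0 : m = 0
  · subst h0; rw [if_pos rfl]; decide
  · rw [if_neg h0]
    unfold PySem.Int.toChars
    rw [if_neg (by omega : ¬ ((m : Int) < 0)), Int.toNat_natCast]
    unfold Nat.toDigits
    rw [pv_toDigitsCore_eq (m + 1) m [] (Nat.pos_of_ne_zero h0)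
      (lt_of_lt_of_le (Nat.lt_pow_self (by norm_num))
        (Nat.pow_le_pow_right (by norm_num) (Nat.le_succ m)))]
    simp

theorem pv_toStr_digit (d : Nat) (h : d < 10) :
    PySem.Int.toStr (d : Int) = String.ofList [Nat.digitChar d] := by
  unfold PySem.Int.toStr
  congr 1
  rw [pv_toChars_natCast]
  by_cases h0 : d = 0
  · subst h0; rw [if_pos rfl]; decide
  · rw [if_neg h0, Nat.digits_def' (by norm_num : (1:Nat) < 10) (Nat.pos_of_ne_zero h0),
      Nat.mod_eq_of_lt h, Nat.div_eq_of_lt h, Nat.digits_zero]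
    simp

theorem pv_valid_iff (button : List String) (m : Nat) :
    target2minusValid (m : Int) button = true ↔
      ((∀ d ∈ Nat.digits 10 m, (d : Int) ∈ pvAllowed button) ∧
       (m = 0 → (0 : Int) ∈ pvAllowed button)) := by
  unfold target2minusValid
  rw [PySem.Set.issubset_iff]
  constructor
  · intro hsub
    have hmem : ∀ c ∈ PySem.Int.toChars (m : Int), String.ofList [c] ∈ button := by
      intro c hc
      apply hsub
      rw [PySem.Set.mem_ofList, PySem.Int.toList_toStr]
      exact List.mem_map_of_mem hc
    constructor
    · intro d hd
      have hd10 : d < 10 := Nat.digits_lt_base (by norm_num) hd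
      rw [mem_pvAllowed]
      refine ⟨by positivity, by exact_mod_cast hd10, ?_⟩
      rw [List.contains_iff_mem, pv_toStr_digit d hd10]
      apply hmem
      rw [pv_toChars_natCast]
      have hm0 : m ≠ 0 := by rintro rfl; simp at hd
      rw [if_neg hm0, List.mem_reverse]
      exact List.mem_map_of_mem hd
    · intro hm0
      subst hm0
      rw [mem_pvAllowed]
      refine ⟨le_rfl, by norm_num, ?_⟩
      rw [List.contains_iff_mem,
        show ((0:Int)) = ((0:Nat):Int) by simp, pv_toStr_digit 0 (by norm_num)]
      apply hmem
      rw [pv_toChars_natCast, if_pos rfl]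
      simp [show Nat.digitChar 0 = '0' from rfl]
  · rintro ⟨hdig, h0⟩ x hx
    rw [PySem.Set.mem_ofList, PySem.Int.toList_toStr] at hx
    obtain ⟨c, hc, rfl⟩ := List.mem_map.mp hx
    rw [pv_toChars_natCast] at hc
    by_cases hm0 : m = 0
    · rw [if_pos hm0] at hc
      simp at hc
      subst hc
      have hmem := (mem_pvAllowed button 0).mp (h0 hm0)
      have hcon := hmem.2.2
      rw [List.contains_iff_mem,
        show ((0:Int)) = ((0:Nat):Int) by simp, pv_toStr_digit 0 (by norm_num)] at hcon
      simpa [show Nat.digitChar 0 = '0' from rfl] using hcon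
    · rw [if_neg hm0, List.mem_reverse] at hc
      obtain ⟨d, hd, rfl⟩ := List.mem_map.mp hc
      have hd10 : d < 10 := Nat.digits_lt_base (by norm_num) hd
      have hmem := (mem_pvAllowed button d).mp (hdig d hd)
      have hcon := hmem.2.2
      rw [List.contains_iff_mem, pv_toStr_digit d hd10] at hcon
      exact hcon

theorem pv_revDigits_eq (n : Int) (h : 0 ≤ n) :
    target2minusRevDigits n = (Nat.digits 10 n.toNat).map (fun d : Nat => (d : Int)) := by
  obtain ⟨N, rfl⟩ : ∃ N : Nat, n = ↑N := ⟨n.toNat, (Int.toNat_of_nonneg h).symm⟩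
  rw [Int.toNat_natCast]
  induction N using Nat.strong_induction_on with
  | _ N ih =>
    rw [target2minusRevDigits]
    by_cases hN : (0:Int) < (N:Int)
    · rw [dif_pos hN]
      have hN' : 0 < N := by exact_mod_cast hN
      have hmod : PySem.Int.mod (↑N) 10 = ((N % 10 : Nat) : Int) := by
        exact_mod_cast PySem.Int.mod_natCast N 10
      have hdiv : PySem.Int.floordiv (↑N) 10 = ((N / 10 : Nat) : Int) := by
        exact_mod_cast PySem.Int.floordiv_natCast N 10
      rw [hmod, hdiv, ih (N / 10) (Nat.div_lt_self hN' (by norm_num)) (by positivity)]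
      rw [Nat.digits_def' (by norm_num : (1:Nat) < 10) hN']
      simp
    · rw [dif_neg hN]
      have : N = 0 := by omega
      subst this; simp

theorem pvVal_reverse_map (l : List Nat) :
    pvVal ((l.map (fun d : Nat => (d : Int))).reverse) = ((Nat.ofDigits 10 l : Nat) : Int) := by
  induction l with
  | nil => simp [pvVal]
  | cons d l ih =>
    rw [List.map_cons, List.reverse_cons, pvVal_append_singleton, ih, Nat.ofDigits_cons]
    push_cast; ring

theorem pv_digits_ofDigits_mem : ∀ l : List Nat, (∀ x ∈ l, x < 10) →
    ∀ d ∈ Nat.digits 10 (Nat.ofDigits 10 l), d ∈ l := by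
  intro l
  induction l with
  | nil => intro _ d hd; simp at hd
  | cons x l ih =>
    intro h d hd
    rw [Nat.ofDigits_cons] at hd
    by_cases hz : x + 10 * Nat.ofDigits 10 l = 0
    · rw [hz] at hd; simp at hd
    · have hx10 : x < 10 := h x (by simp)
      rw [Nat.digits_def' (by norm_num : (1:Nat) < 10) (Nat.pos_of_ne_zero hz)] at hd
      have hmod : (x + 10 * Nat.ofDigits 10 l) % 10 = x := by omega
      have hdiv : (x + 10 * Nat.ofDigits 10 l) / 10 = Nat.ofDigits 10 l := by omega
      rw [hmod, hdiv] at hd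
      rcases List.mem_cons.mp hd with rfl | hd'
      · exact List.mem_cons_self
      · exact List.mem_cons_of_mem _ (ih (fun y hy => h y (List.mem_cons_of_mem _ hy)) d hd')

theorem pv_valid_of_val (button : List String) (t : List Int) (hne : t ≠ []) (hok : pvOK t)
    (hg : pvGood (pvAllowed button) t) :
    target2minusValid (pvVal t) button = true := by
  have hlN : ∀ x ∈ (t.map Int.toNat).reverse, x < 10 := by
    intro x hx
    rw [List.mem_reverse] at hx
    obtain ⟨d, hd, rfl⟩ := List.mem_map.mp hx
    have := hok d hd; omega
  have ht' : (((t.map Int.toNat).reverse).map (fun d : Nat => (d : Int))).reverse = t := by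
    rw [List.map_reverse, List.reverse_reverse, List.map_map]
    conv_rhs => rw [← List.map_id t]
    apply List.map_congr_left
    intro d hd
    simp [Int.toNat_of_nonneg (hok d hd).1]
  have hval : pvVal t = ((Nat.ofDigits 10 ((t.map Int.toNat).reverse) : Nat) : Int) := by
    conv_lhs => rw [← ht']
    exact pvVal_reverse_map _
  rw [hval, pv_valid_iff]
  constructor
  · intro d hd
    have hdl := pv_digits_ofDigits_mem _ hlN d hd
    rw [List.mem_reverse] at hdl
    obtain ⟨e, he, rfl⟩ := List.mem_map.mp hdl
    rw [show ((e.toNat : Nat) : Int) = e from Int.toNat_of_nonneg (hok e he).1]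
    exact hg e he
  · intro h0
    have hv0 : pvVal t = 0 := by rw [hval, h0]; simp
    obtain ⟨c, rest, rfl⟩ : ∃ c rest, t = c :: rest := by
      cases t with
      | nil => exact absurd rfl hne
      | cons c r => exact ⟨c, r, rfl⟩
    have hb := pvVal_bounds rest (fun d hd => hok d (List.mem_cons_of_mem _ hd))
    have hc := hok c (by simp)
    rw [pvVal_cons] at hv0
    have hP : (0:Int) < 10 ^ rest.length := by positivity
    have hcz : c = 0 := by
      by_contra hcc
      have h1 : 1 ≤ c := by omega
      have := le_mul_of_one_le_left hP.le h1
      linarith [hb.1]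
    rw [← hcz]
    exact hg c (by simp)

theorem pv_loop_unfold (button : List String) (fuel : Nat) (init cnt : Int) :
    target2minusLoop button fuel init cnt =
      if target2minusValid init button then cnt + PySem.Str.len (PySem.Int.toStr init)
      else if init - 1 = -1 then 500001
      else match fuel with
        | 0 => 500001
        | f + 1 => target2minusLoop button f (init - 1) (cnt + 1) := by
  cases fuel <;> rfl

theorem pvSpecLoop_eq_some (button : List String) (m : Nat) : ∀ n : Nat, m ≤ n →
    target2minusValid (m : Int) button = true →
    (∀ x : Nat, m < x → x ≤ n → target2minusValid (x : Int) button = false) →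
    pvSpecLoop button n = some m := by
  intro n
  induction n with
  | zero =>
    intro h1 hv _
    have : m = 0 := by omega
    subst this
    simp only [pvSpecLoop]
    rw [if_pos hv]
  | succ n ih =>
    intro h1 hv hmax
    by_cases he : m = n + 1
    · subst he
      simp only [pvSpecLoop]
      rw [if_pos hv]
    · have hvf : target2minusValid ((n + 1 : Nat) : Int) button = false :=
        hmax (n + 1) (by omega) le_rfl
      have : pvSpecLoop button (n+1) = pvSpecLoop button n := by
        simp only [pvSpecLoop]
        rw [if_neg (by rw [hvf]; simp)]
      rw [this]
      exact ih (by omega) hv (fun x hx1 hx2 => hmax x hx1 (by omega))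

theorem pvSpecLoop_eq_none (button : List String) : ∀ n : Nat,
    (∀ x : Nat, x ≤ n → target2minusValid (x : Int) button = false) →
    pvSpecLoop button n = none := by
  intro n
  induction n with
  | zero =>
    intro h
    simp only [pvSpecLoop]
    rw [if_neg (by rw [h 0 le_rfl]; simp)]
  | succ n ih =>
    intro h
    have : pvSpecLoop button (n+1) = pvSpecLoop button n := by
      simp only [pvSpecLoop]
      rw [if_neg (by rw [h (n+1) le_rfl]; simp)]
    rw [this]
    exact ih (fun x hx => h x (by omega))

theorem pv_loopA_eq (button : List String) : ∀ (n : Nat) (fuel : Nat) (cnt : Int), n ≤ fuel →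
    target2minusLoop button fuel (n : Int) cnt =
      (pvSpecLoop button n).elim 500001
        (fun m => cnt + ((n : Int) - (m : Int)) + PySem.Str.len (PySem.Int.toStr (m : Int))) := by
  intro n
  induction n with
  | zero =>
    intro fuel cnt _
    rw [pv_loop_unfold]
    by_cases hv : target2minusValid ((0 : Nat) : Int) button = true
    · rw [if_pos (by exact_mod_cast hv)]
      have hs : pvSpecLoop button 0 = some 0 := by
        simp only [pvSpecLoop]; rw [if_pos hv]
      rw [hs, Option.elim_some]
      push_cast
      omega
    · rw [if_neg (by exact_mod_cast hv), if_pos (by norm_num)]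
      have hs : pvSpecLoop button 0 = none := by
        simp only [pvSpecLoop]
        rw [if_neg (by simpa using hv)]
      rw [hs, Option.elim_none]
  | succ n ih =>
    intro fuel cnt hf
    rw [pv_loop_unfold]
    by_cases hv : target2minusValid ((n + 1 : Nat) : Int) button = true
    · rw [if_pos (by exact_mod_cast hv)]
      have hs : pvSpecLoop button (n+1) = some (n+1) := by
        simp only [pvSpecLoop]; rw [if_pos hv]
      rw [hs, Option.elim_some]
      push_cast
      omega
    · rw [if_neg (by exact_mod_cast hv), if_neg (by push_cast; omega)]
      cases fuel with
      | zero => omega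
      | succ f =>
        show target2minusLoop button f (((n + 1 : Nat) : Int) - 1) (cnt + 1) = _
        rw [show (((n + 1 : Nat) : Int) - 1) = ((n : Nat) : Int) by push_cast; ring]
        rw [ih f (cnt + 1) (by omega)]
        have hs : pvSpecLoop button (n+1) = pvSpecLoop button n := by
          simp only [pvSpecLoop]
          rw [if_neg (by simpa using hv)]
        rw [hs]
        cases hx : pvSpecLoop button n with
        | some m => rw [Option.elim_some, Option.elim_some]; push_cast; omega
        | none => rfl

theorem pv_cancel_le {a b va vb P : Int} (hP : 0 < P) (ha : 0 ≤ va) (hva : va < P)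
    (hb : 0 ≤ vb) (hvb : vb < P) (h : a * P + va ≤ b * P + vb) : a ≤ b := by
  by_contra hab
  have h1 : b + 1 ≤ a := by omega
  have h2 : (b + 1) * P ≤ a * P := mul_le_mul_of_nonneg_right h1 hP.le
  rw [add_mul, one_mul] at h2
  linarith

theorem pv_lt_of_lt {a b va vb P : Int} (hP : 0 < P) (ha : 0 ≤ va) (hva : va < P)
    (hb : 0 ≤ vb) (h : a < b) : a * P + va < b * P + vb := by
  have h2 : (a + 1) * P ≤ b * P := mul_le_mul_of_nonneg_right (by omega) hP.le
  rw [add_mul, one_mul] at h2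
  linarith

theorem pv_fallback_some (c : Int) (rest al t : List Int) (hp : al.Pairwise (· < ·))
    (h : target2minusBestLeFallback c rest al = some t) :
    ∃ dl dM, dl ∈ al ∧ dl < c ∧ (∀ x ∈ al, x < c → x ≤ dl) ∧ dM ∈ al ∧ (∀ x ∈ al, x ≤ dM) ∧
      t = dl :: List.replicate rest.length dM := by
  simp only [target2minusBestLeFallback] at h
  by_cases he : (al.filter (fun d => decide (d < c))).isEmpty
  · rw [if_pos he] at h; exact absurd h (by simp)
  · rw [if_neg he] at h
    have hlne : al.filter (fun d => decide (d < c)) ≠ [] := fun hh => he (by simp [hh])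
    have halne : al ≠ [] := by
      intro hh; apply hlne; rw [hh]; simp
    have hplower : (al.filter (fun d => decide (d < c))).Pairwise (· < ·) :=
      List.Pairwise.filter _ hp
    injection h with h
    refine ⟨(al.filter (fun d => decide (d < c))).getLast hlne, al.getLast halne, ?_, ?_, ?_,
      List.getLast_mem halne, pv_getLast_max al hp halne, ?_⟩
    · exact (List.mem_filter.mp (List.getLast_mem hlne)).1
    · have := (List.mem_filter.mp (List.getLast_mem hlne)).2
      simpa using this
    · intro x hx hxc
      exact pv_getLast_max _ hplower hlne x (List.mem_filter.mpr ⟨hx, by simpa using hxc⟩)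
    · rw [← h, PySem.List.pyGetD_neg_one _ 0 hlne, PySem.List.pyGetD_neg_one al 0 halne]

theorem pv_fallback_none (c : Int) (rest al : List Int)
    (h : target2minusBestLeFallback c rest al = none) : ∀ x ∈ al, ¬ x < c := by
  unfold target2minusBestLeFallback at h
  by_cases he : (al.filter (fun d => decide (d < c))).isEmpty
  · intro x hx hxc
    rw [List.isEmpty_iff] at he
    have : x ∈ al.filter (fun d => decide (d < c)) := List.mem_filter.mpr ⟨hx, by simpa using hxc⟩
    rw [he] at this
    simp at this
  · rw [if_neg he] at h; simp at h

theorem pv_fallback_case_some (al : List Int) (hal : pvOK al) (hp : al.Pairwise (· < ·))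
    (c : Int) (rest t : List Int) (hok : pvOK (c :: rest))
    (ht : target2minusBestLeFallback c rest al = some t) :
    t.length = (c :: rest).length ∧ pvGood al t ∧ pvOK t ∧ pvVal t ≤ pvVal (c :: rest) := by
  obtain ⟨dl, dM, hdl, hdlc, _, hdM, _, rfl⟩ := pv_fallback_some c rest al t hp ht
  have hdlOK := hal dl hdl
  have hdMOK := hal dM hdM
  have hokrep : pvOK (List.replicate rest.length dM) := by
    intro d hd; rw [List.mem_replicate] at hd; rw [hd.2]; exact hdMOK
  have hrep := pvVal_bounds _ hokrep
  rw [List.length_replicate] at hrep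
  have hrest := pvVal_bounds rest (fun d hd => hok d (List.mem_cons_of_mem _ hd))
  have hP : (0:Int) < 10 ^ rest.length := by positivity
  refine ⟨by simp, ?_, ?_, ?_⟩
  · intro d hd
    rcases List.mem_cons.mp hd with rfl | hd'
    · exact hdl
    · rw [List.mem_replicate] at hd'; rw [hd'.2]; exact hdM
  · intro d hd
    rcases List.mem_cons.mp hd with rfl | hd'
    · exact hdlOK
    · exact hokrep d hd'
  · rw [pvVal_cons, pvVal_cons, List.length_replicate]
    have h1 : (dl + 1) * 10 ^ rest.length ≤ c * 10 ^ rest.length :=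
      mul_le_mul_of_nonneg_right (by omega) hP.le
    rw [add_mul, one_mul] at h1
    linarith [hrep.2, hrest.1]

theorem pv_bestLe_some (al : List Int) (hal : pvOK al) (hp : al.Pairwise (· < ·)) :
    ∀ s t, pvOK s → target2minusBestLe s al = some t →
      t.length = s.length ∧ pvGood al t ∧ pvOK t ∧ pvVal t ≤ pvVal s := by
  intro s
  induction s with
  | nil =>
    intro t _ ht
    rw [target2minusBestLe] at ht
    injection ht with ht
    subst ht
    exact ⟨rfl, fun d hd => by simp at hd, fun d hd => by simp at hd, le_rfl⟩
  | cons c rest ih =>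
    intro t hok ht
    have hokr : pvOK rest := fun d hd => hok d (List.mem_cons_of_mem _ hd)
    have hc := hok c (by simp)
    rw [target2minusBestLe] at ht
    by_cases hcc : al.contains c
    · rw [if_pos hcc] at ht
      cases hrec : target2minusBestLe rest al with
      | some t' =>
        rw [hrec] at ht
        injection ht with ht
        subst ht
        obtain ⟨hl, hg, hokt, hv⟩ := ih t' hokr hrec
        refine ⟨by simp [hl], ?_, ?_, ?_⟩
        · intro d hd
          rcases List.mem_cons.mp hd with rfl | hd'
          · exact List.contains_iff_mem.mp hcc
          · exact hg d hd'
        · intro d hd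
          rcases List.mem_cons.mp hd with rfl | hd'
          · exact hc
          · exact hokt d hd'
        · rw [pvVal_cons, pvVal_cons, hl]; linarith
      | none =>
        rw [hrec] at ht
        exact pv_fallback_case_some al hal hp c rest t hok ht
    · rw [if_neg hcc] at ht
      exact pv_fallback_case_some al hal hp c rest t hok ht

theorem pv_bestLe_none (al : List Int) (hal : pvOK al) :
    ∀ s u, pvOK s → target2minusBestLe s al = none → u.length = s.length →
      pvGood al u → pvVal s < pvVal u := by
  intro s
  induction s with
  | nil =>
    intro u _ hn
    rw [target2minusBestLe] at hn
    exact absurd hn (by simp)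
  | cons c rest ih =>
    intro u hok hn hlen hg
    have hokr : pvOK rest := fun d hd => hok d (List.mem_cons_of_mem _ hd)
    obtain ⟨u0, urest, rfl⟩ : ∃ u0 urest, u = u0 :: urest := by
      cases u with
      | nil => simp at hlen
      | cons a b => exact ⟨a, b, rfl⟩
    have hlen' : urest.length = rest.length := by simpa using hlen
    have hu0 : u0 ∈ al := hg u0 (by simp)
    have hgur : pvGood al urest := fun d hd => hg d (List.mem_cons_of_mem _ hd)
    have hokur : pvOK urest := fun d hd => hal d (hgur d hd)
    rw [target2minusBestLe] at hn
    have hfb : target2minusBestLeFallback c rest al = none := by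
      by_cases hcc : al.contains c
      · rw [if_pos hcc] at hn
        cases hrec : target2minusBestLe rest al with
        | some t' => rw [hrec] at hn; simp at hn
        | none => rw [hrec] at hn; exact hn
      · rw [if_neg hcc] at hn; exact hn
    have hnl := pv_fallback_none c rest al hfb
    have hc_le : c ≤ u0 := by
      by_contra hlt
      exact hnl u0 hu0 (by omega)
    have hbrest := pvVal_bounds rest hokr
    have hbur := pvVal_bounds urest hokur
    rw [hlen'] at hbur
    have hP : (0:Int) < 10 ^ rest.length := by positivity
    rw [pvVal_cons, pvVal_cons, hlen']
    rcases eq_or_lt_of_le hc_le with rfl | hlt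
    · have hcc : al.contains c = true := List.contains_iff_mem.mpr hu0
      rw [if_pos hcc] at hn
      cases hrec : target2minusBestLe rest al with
      | some t' => rw [hrec] at hn; simp at hn
      | none =>
        have := ih urest hokr hrec hlen' hgur
        linarith
    · exact pv_lt_of_lt hP hbrest.1 hbrest.2 hbur.1 hlt

theorem pv_bestLe_max (al : List Int) (hal : pvOK al) (hp : al.Pairwise (· < ·)) :
    ∀ s t u, pvOK s → target2minusBestLe s al = some t → u.length = s.length →
      pvGood al u → pvVal u ≤ pvVal s → pvVal u ≤ pvVal t := by
  intro s
  induction s with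
  | nil =>
    intro t u _ ht hlen _ hv
    rw [target2minusBestLe] at ht
    injection ht with ht
    subst ht
    have : u = [] := List.eq_nil_of_length_eq_zero (by simpa using hlen)
    subst this
    exact hv
  | cons c rest ih =>
    intro t u hok ht hlen hg hv
    have hokr : pvOK rest := fun d hd => hok d (List.mem_cons_of_mem _ hd)
    obtain ⟨u0, urest, rfl⟩ : ∃ u0 urest, u = u0 :: urest := by
      cases u with
      | nil => simp at hlen
      | cons a b => exact ⟨a, b, rfl⟩
    have hlen' : urest.length = rest.length := by simpa using hlen
    have hu0 : u0 ∈ al := hg u0 (by simp)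
    have hgur : pvGood al urest := fun d hd => hg d (List.mem_cons_of_mem _ hd)
    have hokur : pvOK urest := fun d hd => hal d (hgur d hd)
    have hbrest := pvVal_bounds rest hokr
    have hbur := pvVal_bounds urest hokur
    rw [hlen'] at hbur
    have hP : (0:Int) < 10 ^ rest.length := by positivity
    have hv' : u0 * 10 ^ rest.length + pvVal urest ≤ c * 10 ^ rest.length + pvVal rest := by
      rw [pvVal_cons, pvVal_cons, hlen'] at hv
      exact hv
    have hu0c : u0 ≤ c := pv_cancel_le hP hbur.1 hbur.2 hbrest.1 hbrest.2 hv'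
    rw [target2minusBestLe] at ht
    by_cases hcc : al.contains c
    · rw [if_pos hcc] at ht
      cases hrec : target2minusBestLe rest al with
      | some t' =>
        rw [hrec] at ht
        injection ht with ht
        subst ht
        obtain ⟨hlt', _, hokt', _⟩ := pv_bestLe_some al hal hp rest t' hokr hrec
        have hbt' := pvVal_bounds t' hokt'
        rw [pvVal_cons, pvVal_cons, hlen', hlt']
        rcases eq_or_lt_of_le hu0c with rfl | hlt
        · have hvur : pvVal urest ≤ pvVal rest := by linarith
          have := ih t' urest hokr hrec hlen' hgur hvur
          linarith
        · have := pv_lt_of_lt hP hbur.1 hbur.2 hbt'.1 hlt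
          linarith
      | none =>
        rw [hrec] at ht
        obtain ⟨dl, dM, hdl, _, hdlmax, hdM, hdMmax, rfl⟩ := pv_fallback_some c rest al t hp ht
        rcases eq_or_lt_of_le hu0c with rfl | hlt
        · have := pv_bestLe_none al hal rest urest hokr hrec hlen' hgur
          linarith
        · have hu0dl : u0 ≤ dl := hdlmax u0 hu0 hlt
          have hurle : pvVal urest ≤ pvVal (List.replicate rest.length dM) := by
            have := pvVal_le_replicate urest dM hokur (fun x hx => hdMmax x (hgur x hx))
              (hal dM hdM).1
            rwa [hlen'] at this
          rw [pvVal_cons, pvVal_cons, List.length_replicate, hlen']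
          have := mul_le_mul_of_nonneg_right hu0dl hP.le
          linarith
    · rw [if_neg hcc] at ht
      obtain ⟨dl, dM, hdl, _, hdlmax, hdM, hdMmax, rfl⟩ := pv_fallback_some c rest al t hp ht
      rcases eq_or_lt_of_le hu0c with rfl | hlt
      · exact absurd (List.contains_iff_mem.mpr hu0) hcc
      · have hu0dl : u0 ≤ dl := hdlmax u0 hu0 hlt
        have hurle : pvVal urest ≤ pvVal (List.replicate rest.length dM) := by
          have := pvVal_le_replicate urest dM hokur (fun x hx => hdMmax x (hgur x hx))
            (hal dM hdM).1
          rwa [hlen'] at this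
        rw [pvVal_cons, pvVal_cons, List.length_replicate, hlen']
        have := mul_le_mul_of_nonneg_right hu0dl hP.le
        linarith

theorem pv_foldl_const_eq_replicate {α : Type} : ∀ (l : List α) (d a : Int),
    l.foldl (fun m _ => 10 * m + d) a =
      (List.replicate l.length d).foldl (fun m x => 10 * m + x) a := by
  intro l
  induction l with
  | nil => intro d a; simp
  | cons x l ih =>
    intro d a
    simp only [List.foldl_cons, List.length_cons, List.replicate_succ]
    exact ih d (10 * a + d)

theorem pv_canonical (button : List String) (x : Nat) (hx0 : x ≠ 0)
    (hv : target2minusValid (x : Int) button = true) :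
    ∃ u : List Int, u.length = (Nat.digits 10 x).length ∧ pvGood (pvAllowed button) u ∧
      pvOK u ∧ pvVal u = ↑x := by
  refine ⟨((Nat.digits 10 x).map (fun d : Nat => (d : Int))).reverse, by simp, ?_, ?_, ?_⟩
  · intro d hd
    rw [List.mem_reverse] at hd
    obtain ⟨e, he, rfl⟩ := List.mem_map.mp hd
    exact ((pv_valid_iff button x).mp hv).1 e he
  · intro d hd
    rw [List.mem_reverse] at hd
    obtain ⟨e, he, rfl⟩ := List.mem_map.mp hd
    have := Nat.digits_lt_base (by norm_num) he
    constructor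
    · positivity
    · exact_mod_cast this
  · rw [pvVal_reverse_map, Nat.ofDigits_digits]

theorem pv_core (button : List String) (N : Nat) (sL : List Int)
    (hOKs : pvOK sL) (hval : pvVal sL = ↑N) (hne : sL ≠ [])
    (hub : ((N : Int)) < 10 ^ sL.length)
    (hlow : 2 ≤ sL.length → (10 : Int) ^ (sL.length - 1) ≤ ↑N) :
    (pvSpecLoop button N).elim (500001 : Int)
      (fun m => ((N : Int) - (m : Int)) + PySem.Str.len (PySem.Int.toStr (m : Int))) =
    (target2minusBestLe sL (pvAllowed button)).elim
      (if 2 ≤ sL.length ∧ ¬ (pvAllowed button).isEmpty = true then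
         ((N : Int) - pvVal (List.replicate (sL.length - 1) (PySem.List.pyGetD (pvAllowed button) (-1) 0))) +
           PySem.Str.len (PySem.Int.toStr (pvVal (List.replicate (sL.length - 1) (PySem.List.pyGetD (pvAllowed button) (-1) 0))))
       else 500001)
      (fun t => ((N : Int) - pvVal t) + PySem.Str.len (PySem.Int.toStr (pvVal t))) := by
  have halOK := pvAllowed_OK button
  have halP := pvAllowed_pairwise button
  set al := pvAllowed button with hal
  have hk1 : 1 ≤ sL.length := by
    cases sL with
    | nil => exact absurd rfl hne
    | cons a b => simp
  have hubN : N < 10 ^ sL.length := by exact_mod_cast hub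
  cases hbest : target2minusBestLe sL al with
  | some t =>
    obtain ⟨hlt, hgt, hokt, hvle⟩ := pv_bestLe_some al halOK halP sL t hOKs hbest
    have htne : t ≠ [] := by
      intro hh; rw [hh] at hlt; simp at hlt; omega
    have hbt := pvVal_bounds t hokt
    have hvalid := pv_valid_of_val button t htne hokt hgt
    have hm0 : 0 ≤ pvVal t := hbt.1
    have hmle : pvVal t ≤ ↑N := by rw [hval] at hvle; exact hvle
    have hsp : pvSpecLoop button N = some (pvVal t).toNat := by
      apply pvSpecLoop_eq_some button (pvVal t).toNat N (by omega)
      · rw [Int.toNat_of_nonneg hm0]; exact hvalid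
      · intro x h1 h2
        rw [← Bool.not_eq_true]
        intro hvx
        have hx0 : x ≠ 0 := by omega
        obtain ⟨u, hulen, hug, huok, huval⟩ := pv_canonical button x hx0 hvx
        have hxk : (Nat.digits 10 x).length ≤ sL.length :=
          (Nat.digits_length_le_iff (by norm_num) x).mpr (lt_of_le_of_lt h2 hubN)
        rcases eq_or_lt_of_le hxk with heq | hlt2
        · have := pv_bestLe_max al halOK halP sL t u hOKs hbest (by rw [hulen, heq]) hug
            (by rw [huval, hval]; exact_mod_cast h2)
          rw [huval] at this
          omega
        · by_cases h0al : (0 : Int) ∈ al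
          · have hu'len : (List.replicate (sL.length - (Nat.digits 10 x).length) 0 ++ u).length = sL.length := by
              simp [hulen]; omega
            have hu'g : pvGood al (List.replicate (sL.length - (Nat.digits 10 x).length) 0 ++ u) := by
              intro d hd
              rw [List.mem_append] at hd
              rcases hd with hd | hd
              · rw [List.mem_replicate] at hd; rw [hd.2]; exact h0al
              · exact hug d hd
            have hu'val : pvVal (List.replicate (sL.length - (Nat.digits 10 x).length) 0 ++ u) = ↑x := by
              rw [pvVal_zeros_prefix, huval]
            have := pv_bestLe_max al halOK halP sL t _ hOKs hbest hu'len hu'g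
              (by rw [hu'val, hval]; exact_mod_cast h2)
            rw [hu'val] at this
            omega
          · obtain ⟨t0, t1, rfl⟩ : ∃ t0 t1, t = t0 :: t1 := by
              cases t with
              | nil => exact absurd rfl htne
              | cons a b => exact ⟨a, b, rfl⟩
            have ht0 : t0 ∈ al := hgt t0 (by simp)
            have ht0' := hokt t0 (by simp)
            have ht0pos : 1 ≤ t0 := by
              rcases eq_or_lt_of_le ht0'.1 with hz | hp2
              · exact absurd (hz ▸ ht0) h0al
              · omega
            have ht1len : t1.length = sL.length - 1 := by
              simp at hlt; omega
            have hbt1 := pvVal_bounds t1 (fun d hd => hokt d (List.mem_cons_of_mem _ hd))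
            have hmlow : (10 : Int) ^ (sL.length - 1) ≤ pvVal (t0 :: t1) := by
              rw [pvVal_cons, ht1len]
              have := le_mul_of_one_le_left (by positivity : (0:Int) ≤ 10 ^ (sL.length - 1)) ht0pos
              linarith [hbt1.1]
            have hxlt : (x : Int) < 10 ^ (sL.length - 1) := by
              have hxj : x < 10 ^ (Nat.digits 10 x).length :=
                Nat.lt_base_pow_length_digits (by norm_num)
              have hpw : (10 : Nat) ^ (Nat.digits 10 x).length ≤ 10 ^ (sL.length - 1) :=
                Nat.pow_le_pow_right (by norm_num) (by omega)
              have hcast : ((x : Nat) : Int) < (((10 : Nat) ^ (sL.length - 1) : Nat) : Int) :=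
                Int.ofNat_lt.mpr (lt_of_lt_of_le hxj hpw)
              calc (x : Int) < (((10 : Nat) ^ (sL.length - 1) : Nat) : Int) := hcast
                _ = 10 ^ (sL.length - 1) := by push_cast; ring
            have h3 : pvVal (t0 :: t1) < (x : Int) := by omega
            linarith
    rw [hsp, Option.elim_some, Option.elim_some, Int.toNat_of_nonneg hm0]
  | none =>
    by_cases hcond : 2 ≤ sL.length ∧ ¬ al.isEmpty = true
    · obtain ⟨hk2, hane⟩ := hcond
      have halne : al ≠ [] := by
        intro hh; exact hane (by simp [hh])
      have hdMg : PySem.List.pyGetD al (-1) 0 = al.getLast halne :=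
        PySem.List.pyGetD_neg_one al 0 halne
      have hdMm : PySem.List.pyGetD al (-1) 0 ∈ al := by
        rw [hdMg]; exact List.getLast_mem halne
      have hdMmax : ∀ x ∈ al, x ≤ PySem.List.pyGetD al (-1) 0 := by
        rw [hdMg]; exact pv_getLast_max al halP halne
      have hdMok := halOK _ hdMm
      set dM := PySem.List.pyGetD al (-1) 0 with hdM
      have hrne : List.replicate (sL.length - 1) dM ≠ [] := by
        intro hh
        have := congrArg List.length hh
        simp at this
        omega
      have hrok : pvOK (List.replicate (sL.length - 1) dM) := by
        intro d hd; rw [List.mem_replicate] at hd; rw [hd.2]; exact hdMok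
      have hrg : pvGood al (List.replicate (sL.length - 1) dM) := by
        intro d hd; rw [List.mem_replicate] at hd; rw [hd.2]; exact hdMm
      have hbr := pvVal_bounds _ hrok
      have hvalid := pv_valid_of_val button _ hrne hrok hrg
      have hmle : pvVal (List.replicate (sL.length - 1) dM) ≤ ↑N := by
        have h2 := hbr.2
        rw [List.length_replicate] at h2
        have h10 := hlow hk2
        linarith
      have hsp : pvSpecLoop button N = some (pvVal (List.replicate (sL.length - 1) dM)).toNat := by
        apply pvSpecLoop_eq_some button _ N (by omega)
        · rw [Int.toNat_of_nonneg hbr.1]; exact hvalid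
        · intro x h1 h2
          rw [← Bool.not_eq_true]
          intro hvx
          have hx0 : x ≠ 0 := by omega
          obtain ⟨u, hulen, hug, huok, huval⟩ := pv_canonical button x hx0 hvx
          have hxk : (Nat.digits 10 x).length ≤ sL.length :=
            (Nat.digits_length_le_iff (by norm_num) x).mpr (lt_of_le_of_lt h2 hubN)
          rcases eq_or_lt_of_le hxk with heq | hlt2
          · have := pv_bestLe_none al halOK sL u hOKs hbest (by rw [hulen, heq]) hug
            rw [huval, hval] at this
            omega
          · have hst1 : pvVal u ≤ pvVal (List.replicate u.length dM) :=
              pvVal_le_replicate u dM huok (fun y hy => hdMmax y (hug y hy)) hdMok.1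
            have hst2 : pvVal (List.replicate u.length dM) ≤
                pvVal (List.replicate (sL.length - 1) dM) :=
              pvVal_replicate_mono dM hdMok.1 (by rw [hulen]; omega)
            rw [huval] at hst1
            omega
      rw [hsp, Option.elim_some, Option.elim_none, Int.toNat_of_nonneg hbr.1, if_pos (by exact ⟨hk2, hane⟩)]
    · have hnone : pvSpecLoop button N = none := by
        apply pvSpecLoop_eq_none
        intro x hx
        rw [← Bool.not_eq_true]
        intro hvx
        by_cases hae : al = []
        · rcases Nat.eq_zero_or_pos x with rfl | hxp
          · have := ((pv_valid_iff button 0).mp hvx).2 rfl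
            rw [← hal, hae] at this
            simp at this
          · have hd := ((pv_valid_iff button x).mp hvx).1
            obtain ⟨e, he⟩ := List.exists_mem_of_ne_nil (Nat.digits 10 x)
              (Nat.digits_ne_nil_iff_ne_zero.mpr (by omega))
            have := hd e he
            rw [← hal, hae] at this
            simp at this
        · have hk : sL.length = 1 := by
            rcases not_and_or.mp hcond with hh | hh
            · omega
            · exact absurd (List.isEmpty_iff.mp (not_not.mp hh)) hae
          have hN10 : ((N : Int)) < 10 := by
            rw [hk] at hub; simpa using hub
          rcases Nat.eq_zero_or_pos x with rfl | hxp
          · have h0 := ((pv_valid_iff button 0).mp hvx).2 rfl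
            rw [← hal] at h0
            have := pv_bestLe_none al halOK sL [0] hOKs hbest (by simp [hk])
              (by intro d hd; simp at hd; rw [hd]; exact h0)
            rw [hval] at this
            have hv0 : pvVal [(0:Int)] = 0 := by simp [pvVal]
            rw [hv0] at this
            omega
          · have hx10 : x < 10 := by
              have : (x : Int) ≤ (N : Int) := by exact_mod_cast hx
              omega
            have hdigx : Nat.digits 10 x = [x] := by
              rw [Nat.digits_def' (by norm_num : (1:Nat) < 10) hxp, Nat.mod_eq_of_lt hx10,
                Nat.div_eq_of_lt hx10, Nat.digits_zero]
            have hd := ((pv_valid_iff button x).mp hvx).1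
            have hxal : ((x : Nat) : Int) ∈ al := by
              have := hd x (by rw [hdigx]; simp)
              rwa [← hal] at this
            have := pv_bestLe_none al halOK sL [((x : Nat) : Int)] hOKs hbest (by simp [hk])
              (by intro d hdm; simp at hdm; rw [hdm]; exact hxal)
            rw [hval] at this
            have hvx' : pvVal [((x : Nat) : Int)] = ↑x := by simp [pvVal]
            rw [hvx'] at this
            omega
      rw [hnone, Option.elim_none, Option.elim_none, if_neg hcond]

theorem pv_main (init : Int) (button : List String) (h : 0 ≤ init) :
    target2minus init button = target2minus_alt init button := by
  obtain ⟨N, rfl⟩ : ∃ N : Nat, init = ↑N := ⟨init.toNat, (Int.toNat_of_nonneg h).symm⟩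
  have hA : target2minus (↑N) button =
      (pvSpecLoop button N).elim (500001 : Int)
        (fun m => ((N : Int) - (m : Int)) + PySem.Str.len (PySem.Int.toStr (m : Int))) := by
    unfold target2minus
    rw [Int.toNat_natCast, pv_loopA_eq button N N 0 le_rfl]
    cases hs : pvSpecLoop button N with
    | some m => rw [Option.elim_some, Option.elim_some, zero_add]
    | none => rfl
  have hrev : target2minusRevDigits ((N : Nat) : Int) = (Nat.digits 10 N).map (fun d : Nat => (d : Int)) := by
    have := pv_revDigits_eq ((N : Nat) : Int) (by positivity)
    rwa [Int.toNat_natCast] at this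
  -- the digit string Source B builds
  set sL : List Int := if N = 0 then [(0 : Int)]
    else ((Nat.digits 10 N).map (fun d : Nat => (d : Int))).reverse with hsL
  have hs_eq : (if ((target2minusRevDigits ((N : Nat) : Int)).reverse).isEmpty = true
      then [(0 : Int)] else (target2minusRevDigits ((N : Nat) : Int)).reverse) = sL := by
    rw [hrev, hsL]
    by_cases hN0 : N = 0
    · subst hN0; simp
    · have hdne : Nat.digits 10 N ≠ [] := Nat.digits_ne_nil_iff_ne_zero.mpr hN0
      rw [if_neg hN0, if_neg (by simp [hdne])]
  have hOKs : pvOK sL := by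
    rw [hsL]
    by_cases hN0 : N = 0
    · rw [if_pos hN0]; intro d hd; simp at hd; omega
    · rw [if_neg hN0]
      intro d hd
      rw [List.mem_reverse] at hd
      obtain ⟨e, he, rfl⟩ := List.mem_map.mp hd
      have := Nat.digits_lt_base (by norm_num) he
      constructor
      · positivity
      · exact_mod_cast this
  have hval : pvVal sL = ↑N := by
    rw [hsL]
    by_cases hN0 : N = 0
    · rw [if_pos hN0, hN0]; simp [pvVal]
    · rw [if_neg hN0, pvVal_reverse_map, Nat.ofDigits_digits]
  have hne : sL ≠ [] := by
    rw [hsL]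
    by_cases hN0 : N = 0
    · rw [if_pos hN0]; simp
    · rw [if_neg hN0]
      have hdne : Nat.digits 10 N ≠ [] := Nat.digits_ne_nil_iff_ne_zero.mpr hN0
      simpa using hdne
  have hlenL : sL.length = if N = 0 then 1 else (Nat.digits 10 N).length := by
    rw [hsL]
    by_cases hN0 : N = 0
    · rw [if_pos hN0, if_pos hN0]; rfl
    · rw [if_neg hN0, if_neg hN0]; simp
  have hub : ((N : Int)) < 10 ^ sL.length := by
    rw [hlenL]
    by_cases hN0 : N = 0
    · rw [if_pos hN0, hN0]; norm_num
    · rw [if_neg hN0]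
      have := Nat.lt_base_pow_length_digits (b := 10) (m := N) (by norm_num)
      exact_mod_cast this
  have hlow : 2 ≤ sL.length → (10 : Int) ^ (sL.length - 1) ≤ ↑N := by
    intro hk2
    rw [hlenL] at hk2 ⊢
    by_cases hN0 : N = 0
    · rw [if_pos hN0] at hk2; omega
    · rw [if_neg hN0] at hk2 ⊢
      have hl1 : 0 < (Nat.digits 10 N).length :=
        List.length_pos_of_ne_nil (Nat.digits_ne_nil_iff_ne_zero.mpr hN0)
      have := (Nat.lt_digits_length_iff (b := 10) (k := (Nat.digits 10 N).length - 1)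
        (by norm_num) N).mp (by omega)
      exact_mod_cast this
  rw [hA, pv_core button N sL hOKs hval hne hub hlow]
  -- now show the right-hand side is exactly target2minus_alt
  show _ = target2minus_alt ((N : Nat) : Int) button
  unfold target2minus_alt
  simp only [hs_eq]
  cases hbest : target2minusBestLe sL (pvAllowed button) with
  | some t =>
    show ((N : Int) - pvVal t) + _ = (((N : Nat) : Int) - t.foldl (fun m d => 10 * m + d) 0) + _
    rfl
  | none =>
    by_cases hcond : 2 ≤ sL.length ∧ ¬ (pvAllowed button).isEmpty = true
    · rw [if_pos hcond, if_pos hcond]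
      have hk2 := hcond.1
      have hfold : (PySem.List.pyRange 0 ((sL.length : Int) - 1) 1).foldl
          (fun m _ => 10 * m + PySem.List.pyGetD (pvAllowed button) (-1) 0) 0 =
          pvVal (List.replicate (sL.length - 1) (PySem.List.pyGetD (pvAllowed button) (-1) 0)) := by
        rw [show ((sL.length : Int) - 1) = ((sL.length - 1 : Nat) : Int) by omega]
        rw [PySem.List.pyRange_zero_natCast, pv_foldl_const_eq_replicate]
        simp only [List.length_map, List.length_range]
        rfl
      rw [hfold]
      rfl
    · rw [if_neg hcond, if_neg hcond]
      rfl

-- ===== VERDICT (by name: the statement is the Claim_ definition above) =====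
theorem target2minus_spec : Claim_equal_target2minus := by
  intro init button _ hpre
  unfold Spec_target2minus
  exact pv_main init button hpre
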